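-- pv_equiv track=rewrite | github.com/caiprozect/Bioinformatics_Python | Mission1_Hotfix.py | numbToPtn
-- ===== SOURCE A (Python) =====
-- def numbToPtn(numb, polyLen):
-- 	lNucls = ["A", "C", "G", "T"]
-- 	nQ = numb
-- 	nR = 0
-- 	sPtn = ""
-- 	for i in range(polyLen):
-- 		nQ, nR = divmod(nQ, len(lNucls))
-- 		sPtn = lNucls[nR] + sPtn
-- 	#Endfor
-- 	return sPtn
-- ===== SOURCE B (Python) =====
-- def numbToPtn(numb, polyLen):
--     lNucls = ["A", "C", "G", "T"]
--     return "".join(lNucls[(numb >> (2 * k)) % 4] for k in range(polyLen - 1, -1, -1))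
-- ===== Notes on version B (the rewrite author's own statement) =====
-- stated objective: faster
-- what changed: B extracts each digit positionally most-significant-first straight from the untouched numb with a bit shift ((numb >> 2k) % 4 over a descending range) and joins the letters once, instead of A's least-significant-first divmod quotient chain that prepends each letter to the accumulated string.
import Mathlib
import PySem

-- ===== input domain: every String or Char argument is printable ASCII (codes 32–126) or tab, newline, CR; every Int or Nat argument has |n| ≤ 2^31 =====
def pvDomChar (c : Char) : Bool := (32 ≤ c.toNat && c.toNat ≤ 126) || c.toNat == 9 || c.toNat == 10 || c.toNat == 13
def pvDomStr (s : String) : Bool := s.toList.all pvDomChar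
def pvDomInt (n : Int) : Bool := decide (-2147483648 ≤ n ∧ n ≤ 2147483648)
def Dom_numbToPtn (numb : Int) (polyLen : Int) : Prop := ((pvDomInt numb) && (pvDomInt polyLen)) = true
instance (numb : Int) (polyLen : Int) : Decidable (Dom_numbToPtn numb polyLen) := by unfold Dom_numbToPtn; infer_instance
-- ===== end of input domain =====

-- B extracts each digit positionally most-significant-first from the untouched numb by a
-- bit shift ((numb >> 2k) % 4 over a descending range, joined once), with no running
-- quotient and no string accumulator, instead of A's lsd-first divmod chain that prepends.

-- ===== PORT A =====
-- lNucls[nR]: nR = q % 4 always lies in [0,4), so pyGetD with default "" is exact here.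
def numbToPtn (numb : Int) (polyLen : Int) : String :=
  let lNucls : List String := ["A", "C", "G", "T"]
  let st := (PySem.List.pyRange 0 polyLen 1).foldl
    (fun (s : Int × String) _ =>
      (PySem.Int.floordiv s.1 (lNucls.length : Int),
       PySem.List.pyGetD lNucls (PySem.Int.mod s.1 (lNucls.length : Int)) "" ++ s.2))
    (numb, "")
  st.2

-- ===== PORT B =====
-- "".join(lNucls[(numb >> (2*k)) % 4] for k in range(polyLen-1, -1, -1)): Python's '>>'
-- on Int is Lean's '>>>' (floor shift, exact on negatives; k ≥ 0 in the range, so .toNat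
-- is exact); (… ) % 4 ∈ [0,4), so pyGetD with default "" is exact here.
def numbToPtn_alt (numb : Int) (polyLen : Int) : String :=
  let lNucls : List String := ["A", "C", "G", "T"]
  PySem.Str.join "" ((PySem.List.pyRange (polyLen - 1) (-1) (-1)).map
    (fun k => PySem.List.pyGetD lNucls (PySem.Int.mod (numb >>> (2 * k).toNat) 4) ""))

-- ===== PRECONDITION & SPEC =====
def Spec_numbToPtn (numb : Int) (polyLen : Int) (out : String) : Prop := out = numbToPtn_alt numb polyLen
instance (numb : Int) (polyLen : Int) (out : String) : Decidable (Spec_numbToPtn numb polyLen out) := by unfold Spec_numbToPtn; infer_instance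

-- ===== CLAIM (what is proved, stated in full; the proofs are below) =====
def Claim_equal_numbToPtn : Prop := ∀ (numb : Int) (polyLen : Int), Dom_numbToPtn numb polyLen → Spec_numbToPtn numb polyLen (numbToPtn numb polyLen)

-- ===== LEMMAS AND PROOFS =====

def pvNucl (r : Int) : String := PySem.List.pyGetD ["A", "C", "G", "T"] r ""

-- base-4 pattern of q of length n, msd first (characterises A's loop)
def pvG (q : Int) : Nat → String
  | 0 => ""
  | n+1 => pvG (PySem.Int.floordiv q 4) n ++ pvNucl (PySem.Int.mod q 4)

-- B's letters, head = most significant digit: entry k (from the head) uses exponent n-1-k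
def pvF (numb : Int) : Nat → List String
  | 0 => []
  | n+1 => pvNucl (PySem.Int.mod (PySem.Int.floordiv numb ((4:Int) ^ n)) 4) :: pvF numb n

theorem pvA_loop (l : List Int) (q : Int) (s : String) :
    (l.foldl (fun (st : Int × String) (_ : Int) =>
        (PySem.Int.floordiv st.1 4, pvNucl (PySem.Int.mod st.1 4) ++ st.2)) (q, s)).2
      = pvG q l.length ++ s := by
  induction l generalizing q s with
  | nil => simp [pvG]
  | cons x t ih =>
      simp only [List.foldl_cons, List.length_cons, pvG, ih, String.append_assoc]

theorem pvA_eq (numb polyLen : Int) : numbToPtn numb polyLen = pvG numb polyLen.toNat := by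
  have h := pvA_loop (PySem.List.pyRange 0 polyLen 1) numb ""
  simp only [PySem.List.length_pyRange_one] at h
  simpa [numbToPtn, pvNucl] using h

theorem pvShift_digit (numb : Int) (m : Nat) :
    PySem.Int.mod (numb >>> (2 * m)) 4 = PySem.Int.mod (PySem.Int.floordiv numb ((4:Int) ^ m)) 4 := by
  rw [Int.shiftRight_eq_div_pow, PySem.Int.floordiv_eq_ediv_of_pos (by positivity)]
  congr 2
  rw [pow_mul]; norm_num

theorem pvB_list (numb : Int) (n : Nat) :
    ((PySem.List.pyRange 0 (n : Int) 1).reverse.map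
        (fun k => pvNucl (PySem.Int.mod (numb >>> (2 * k).toNat) 4))) = pvF numb n := by
  induction n with
  | zero => simp [PySem.List.pyRange_one_eq_nil, pvF]
  | succ m ih =>
      have h : PySem.List.pyRange 0 ((m : Int) + 1) 1
          = PySem.List.pyRange 0 (m : Int) 1 ++ [(m : Int)] :=
        PySem.List.pyRange_one_succ_right (by positivity)
      rw [Nat.cast_add, Nat.cast_one, h, List.reverse_append, List.reverse_singleton, List.singleton_append,
        List.map_cons, ih]
      have h2 : (2 * (m : Int)).toNat = 2 * m := by omega
      rw [h2, Int.shiftRight_natCast_right, pvShift_digit]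
      rfl

theorem pvDiv_div (numb : Int) (m : Nat) :
    PySem.Int.floordiv (PySem.Int.floordiv numb 4) ((4:Int) ^ m)
      = PySem.Int.floordiv numb ((4:Int) ^ (m+1)) := by
  rw [PySem.Int.floordiv_eq_ediv_of_pos (b := 4) (by norm_num),
      PySem.Int.floordiv_eq_ediv_of_pos (by positivity),
      PySem.Int.floordiv_eq_ediv_of_pos (by positivity),
      Int.ediv_ediv_of_nonneg (by norm_num : (0:Int) ≤ 4), ← pow_succ']

theorem pvF_shift (numb : Int) (n : Nat) :
    pvF numb (n+1) = pvF (PySem.Int.floordiv numb 4) n ++ [pvNucl (PySem.Int.mod numb 4)] := by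
  induction n with
  | zero =>
      simp [pvF]
  | succ k ih =>
      calc pvF numb (k+2)
          = pvNucl (PySem.Int.mod (PySem.Int.floordiv numb ((4:Int) ^ (k+1))) 4) :: pvF numb (k+1) := rfl
        _ = pvNucl (PySem.Int.mod (PySem.Int.floordiv (PySem.Int.floordiv numb 4) ((4:Int) ^ k)) 4)
              :: (pvF (PySem.Int.floordiv numb 4) k ++ [pvNucl (PySem.Int.mod numb 4)]) := by
              rw [ih, pvDiv_div]
        _ = pvF (PySem.Int.floordiv numb 4) (k+1) ++ [pvNucl (PySem.Int.mod numb 4)] := rfl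

theorem pvJoin_flatten (l : List (List Char)) : PySem.Chars.join [] l = l.flatten := by
  induction l with
  | nil => rfl
  | cons x t ih =>
      cases t with
      | nil => simp [PySem.Chars.join, List.intercalate]
      | cons y u => rw [PySem.Chars.join_cons_cons]; simp_all

theorem pvJoin_append (a b : List String) :
    PySem.Str.join "" (a ++ b) = PySem.Str.join "" a ++ PySem.Str.join "" b := by
  simp [PySem.Str.join, pvJoin_flatten]

theorem pvJoin_F (numb : Int) (n : Nat) : PySem.Str.join "" (pvF numb n) = pvG numb n := by
  induction n generalizing numb with
  | zero => rfl
  | succ m ih =>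
      rw [pvF_shift, pvJoin_append, ih, pvG]
      congr 1
      simp [PySem.Str.join]

-- ===== VERDICT (by name: the statement is the Claim_ definition above) =====
theorem numbToPtn_spec : Claim_equal_numbToPtn := by
  intro numb polyLen _
  show numbToPtn numb polyLen = numbToPtn_alt numb polyLen
  rw [pvA_eq]
  simp only [numbToPtn_alt]
  rw [PySem.List.pyRange_neg_one_eq_reverse]
  have hb : (-1 : Int) + 1 = 0 := by norm_num
  have ha : polyLen - 1 + 1 = polyLen := by ring
  rw [hb, ha]
  have hcast : PySem.List.pyRange 0 polyLen 1
      = PySem.List.pyRange 0 (polyLen.toNat : Int) 1 := by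
    have e : (polyLen - 0).toNat = (((polyLen.toNat : Int)) - 0).toNat := by omega
    rw [PySem.List.pyRange_one, PySem.List.pyRange_one, e]
  rw [hcast]
  have h := pvB_list numb polyLen.toNat
  simp only [pvNucl] at h
  rw [h, pvJoin_F]
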